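-- pv_equiv track=rewrite | github.com/Ace1928/eidosian_forge | archive_forge/code/func_strip_email_quotes.py | strip_email_quotes
-- ===== SOURCE A (Python) =====
-- import string
--
-- def strip_email_quotes(text):
--     """Strip leading email quotation characters ('>').
--
--     Removes any combination of leading '>' interspersed with whitespace that
--     appears *identically* in all lines of the input text.
--
--     Parameters
--     ----------
--     text : str
--
--     Examples
--     --------
--
--     Simple uses::
--
--         In [2]: strip_email_quotes('> > text')
--         Out[2]: 'text'
--
--         In [3]: strip_email_quotes('> > text\\n> > more')
--         Out[3]: 'text\\nmore'
--
--     Note how only the common prefix that appears in all lines is stripped::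
--
--         In [4]: strip_email_quotes('> > text\\n> > more\\n> more...')
--         Out[4]: '> text\\n> more\\nmore...'
--
--     So if any line has no quote marks ('>'), then none are stripped from any
--     of them ::
--
--         In [5]: strip_email_quotes('> > text\\n> > more\\nlast different')
--         Out[5]: '> > text\\n> > more\\nlast different'
--     """
--     lines = text.splitlines()
--     strip_len = 0
--     for characters in zip(*lines):
--         if len(set(characters)) > 1:
--             break
--         prefix_char = characters[0]
--         if prefix_char in string.whitespace or prefix_char == '>':
--             strip_len += 1
--         else:
--             break
--     text = '\n'.join([ln[strip_len:] for ln in lines])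
--     return text
-- ===== SOURCE B (Python) =====
-- import string
--
-- def strip_email_quotes(text):
--     # Two-phase: longest common prefix of all lines first, then trim the
--     # leading run of quote/whitespace characters of that single prefix.
--     lines = text.splitlines()
--     if lines:
--         prefix = lines[0]
--         for ln in lines[1:]:
--             i = 0
--             n = min(len(prefix), len(ln))
--             while i < n and prefix[i] == ln[i]:
--                 i += 1
--             prefix = prefix[:i]
--     else:
--         prefix = ''
--     strip_len = 0
--     while strip_len < len(prefix) and (prefix[strip_len] in string.whitespace or prefix[strip_len] == '>'):
--         strip_len += 1
--     return '\n'.join(ln[strip_len:] for ln in lines)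
-- ===== Notes on version B (the rewrite author's own statement) =====
-- stated objective: alternative
-- what changed: Replaces A's fused column-wise loop (zip(*lines) with a per-column set-uniformity test and in-loop validity break) by a two-phase decomposition: first fold the lines to their longest common prefix, then count the leading run of whitespace/'>' characters of that one short string, then slice all lines.
import Mathlib
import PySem

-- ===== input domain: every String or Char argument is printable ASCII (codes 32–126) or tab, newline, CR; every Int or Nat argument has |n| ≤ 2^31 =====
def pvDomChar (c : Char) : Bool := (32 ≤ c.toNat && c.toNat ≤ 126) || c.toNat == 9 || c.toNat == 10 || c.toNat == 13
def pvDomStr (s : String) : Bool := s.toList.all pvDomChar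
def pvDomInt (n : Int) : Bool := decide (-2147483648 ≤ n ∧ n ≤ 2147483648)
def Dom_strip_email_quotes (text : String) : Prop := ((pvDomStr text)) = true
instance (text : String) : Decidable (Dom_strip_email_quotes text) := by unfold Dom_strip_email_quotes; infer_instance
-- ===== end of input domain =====

-- B replaces A's fused column-wise zip/set loop by a two-phase decomposition
-- (longest-common-prefix of the lines, then a validity trim over that one
-- string); objective: alternative structure, same cost.

-- ===== PORT A =====

-- "c in string.whitespace or c == '>'"
def pvValid (c : Char) : Bool := (" \t\n\u000b\u000c\r".toList).contains c || c == '>'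

-- zip(*lines): the columns; zip stops at the shortest line ([] args give no tuples)
def pvZipStar : List (List Char) → List (List Char)
  | [] => []
  | l :: rest =>
    if h : (l :: rest).all (fun s => !s.isEmpty) then
      ((l :: rest).map (fun s => s.headD ' ')) :: pvZipStar ((l :: rest).map List.tail)
    else []
termination_by ls => (ls.headD []).length
decreasing_by
  cases l with
  | nil => simp at h
  | cons a t => simp

-- the 'for characters in zip(*lines)' loop accumulating strip_len, with its two breaks
def pvLoopA : List (List Char) → Nat
  | [] => 0
  | col :: rest =>
    if 1 < PySem.Set.len (PySem.Set.ofList col) then 0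
    else
      let prefix_char := col.headD ' '   -- characters[0]; columns of zip(*lines) are nonempty
      if pvValid prefix_char then 1 + pvLoopA rest else 0

def strip_email_quotes (text : String) : String :=
  let lines := PySem.Str.splitlines text
  let strip_len : Nat := pvLoopA (pvZipStar (lines.map String.toList))
  PySem.Str.join "\n" (lines.map (fun ln => PySem.Str.slice ln (some (strip_len : Int)) none))

-- ===== PORT B =====

-- Source B's inner index while-loop producing prefix[:i], the common prefix of a and b;
-- ported as the structural recursion peeling equal heads (same comparisons, same result; exact)
def pvCp : List Char → List Char → List Char
  | x :: xs, y :: ys => if x = y then x :: pvCp xs ys else []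
  | _, _ => []

-- Source B's strip_len while-loop: length of the leading run of valid characters
def pvCountValid : List Char → Nat
  | [] => 0
  | c :: cs => if pvValid c then 1 + pvCountValid cs else 0

def strip_email_quotes_alt (text : String) : String :=
  let lines := PySem.Str.splitlines text
  let pre : List Char :=
    match lines.map String.toList with
    | [] => []
    | l :: rest => rest.foldl pvCp l
  let strip_len : Nat := pvCountValid pre
  PySem.Str.join "\n" (lines.map (fun ln => PySem.Str.slice ln (some (strip_len : Int)) none))

-- ===== PRECONDITION & SPEC =====
def Spec_strip_email_quotes (text : String) (out : String) : Prop := out = strip_email_quotes_alt text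
instance (text : String) (out : String) : Decidable (Spec_strip_email_quotes text out) := by unfold Spec_strip_email_quotes; infer_instance

-- ===== CLAIM (what is proved, stated in full; the proofs are below) =====
def Claim_equal_strip_email_quotes : Prop := ∀ (text : String), Dom_strip_email_quotes text → Spec_strip_email_quotes text (strip_email_quotes text)

-- ===== LEMMAS AND PROOFS =====

theorem pv_foldl_cp_nil (rest : List (List Char)) : rest.foldl pvCp [] = [] := by
  induction rest with
  | nil => rfl
  | cons r rest ih => simpa [pvCp] using ih

-- a line whose head is not x (or which is empty) kills the common prefix x::xs
theorem pv_foldl_cp_mismatch (rest : List (List Char)) (x : Char) (xs : List Char)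
    (h : ∃ r ∈ rest, r.head? ≠ some x) : rest.foldl pvCp (x :: xs) = [] := by
  induction rest generalizing x xs with
  | nil => simp at h
  | cons r rest ih =>
    by_cases hr : r.head? = some x
    · cases r with
      | nil => simp at hr
      | cons y t =>
        have hy : y = x := by simpa using hr
        rcases h with ⟨r', hr', hne⟩
        rcases List.mem_cons.mp hr' with h1 | h1
        · subst h1; simp [hy] at hne
        · simpa [pvCp, hy, List.foldl_cons] using ih x (pvCp xs t) ⟨r', h1, hne⟩
    · have : pvCp (x :: xs) r = [] := by
        cases r with
        | nil => rfl
        | cons y t =>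
          have : ¬ x = y := fun hxy => hr (by simp [hxy.symm])
          simp [pvCp, this]
      simpa [List.foldl_cons, this] using pv_foldl_cp_nil rest

-- all lines start with x: the common prefix keeps x and recurses on the tails
theorem pv_foldl_cp_cons (rest : List (List Char)) (x : Char) (acc : List Char)
    (h : ∀ r ∈ rest, r.head? = some x) :
    rest.foldl pvCp (x :: acc) = x :: (rest.map List.tail).foldl pvCp acc := by
  induction rest generalizing acc with
  | nil => rfl
  | cons r rest ih =>
    cases r with
    | nil => exact absurd (h [] (by simp)) (by simp)
    | cons y t =>
      have hy : y = x := by simpa using h (y :: t) (by simp)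
      subst hy
      simp only [List.foldl_cons, List.map_cons, List.tail_cons, pvCp]
      exact ih (pvCp acc t) (fun r hr => h r (by simp [hr]))

theorem pv_set_all_eq (x : Char) (l : List Char) (h : ∀ c ∈ l, c = x) :
    PySem.Set.ofList (x :: l) = [x] := by
  have base : ∀ (l' : List Char), (∀ c ∈ l', c = x) → l'.foldl PySem.Set.add [x] = [x] := by
    intro l' hl'
    induction l' with
    | nil => rfl
    | cons c cs ih =>
      have hc : c = x := hl' c (by simp)
      subst hc
      simp only [List.foldl_cons]
      have : PySem.Set.add [c] c = [c] := by simp [PySem.Set.add, PySem.Set.contains]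
      rw [this]
      exact ih (fun d hd => hl' d (by simp [hd]))
  have : PySem.Set.ofList (x :: l) = (x :: l).foldl PySem.Set.add [] := PySem.Set.ofList_eq_foldl _
  rw [this, List.foldl_cons]
  have : PySem.Set.add [] x = [x] := by simp [PySem.Set.add, PySem.Set.contains]
  rw [this]
  exact base l h

theorem pv_set_two (col : List Char) (x y : Char) (hx : x ∈ col) (hy : y ∈ col) (hne : x ≠ y) :
    1 < PySem.Set.len (PySem.Set.ofList col) := by
  have hnd : (PySem.Set.ofList col).Nodup := PySem.Set.nodup_ofList col
  have hx' : x ∈ PySem.Set.ofList col := (PySem.Set.mem_ofList _ _).mpr hx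
  have hy' : y ∈ PySem.Set.ofList col := (PySem.Set.mem_ofList _ _).mpr hy
  have hsub : ({x, y} : Finset Char) ⊆ (PySem.Set.ofList col).toFinset := by
    intro a ha
    rcases Finset.mem_insert.mp ha with h1 | h1
    · subst h1; simpa using hx'
    · simp only [Finset.mem_singleton] at h1; subst h1; simpa using hy'
  have hcard : ({x, y} : Finset Char).card = 2 := Finset.card_pair hne
  have := Finset.card_le_card hsub
  rw [hcard, List.toFinset_card_of_nodup hnd] at this
  have hlen : PySem.Set.len (PySem.Set.ofList col) = (PySem.Set.ofList col).length := rfl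
  omega

-- main correspondence: A's fused column loop = B's trim of the folded common prefix
theorem pv_main (l : List Char) (rest : List (List Char)) :
    pvLoopA (pvZipStar (l :: rest)) = pvCountValid (rest.foldl pvCp l) := by
  induction l generalizing rest with
  | nil =>
    rw [pvZipStar, dif_neg (by simp)]
    rw [pv_foldl_cp_nil]
    rfl
  | cons x xs ih =>
    by_cases h1 : ∀ r ∈ rest, r.head? = some x
    · -- uniform column of x's
      have hne : ((x :: xs) :: rest).all (fun s => !s.isEmpty) = true := by
        refine List.all_eq_true.mpr ?_
        intro s hs
        rcases List.mem_cons.mp hs with h | h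
        · subst h; simp
        · have := h1 s h
          cases s with
          | nil => simp at this
          | cons a t => simp
      rw [pvZipStar, dif_pos hne]
      have hcol : (((x :: xs) :: rest).map (fun s => s.headD ' ')) = x :: rest.map (fun s => s.headD ' ') := by
        simp
      rw [hcol, pvLoopA]
      have hall : ∀ c ∈ rest.map (fun s => s.headD ' '), c = x := by
        intro c hc
        rcases List.mem_map.mp hc with ⟨r, hr, hcr⟩
        have := h1 r hr
        cases r with
        | nil => simp at this
        | cons a t =>
          have : a = x := by simpa using this
          simpa [this] using hcr.symm
      rw [pv_set_all_eq x _ hall]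
      simp only [PySem.Set.len, List.length_singleton]
      rw [if_neg (by omega)]
      have htails : (((x :: xs) :: rest).map List.tail) = xs :: rest.map List.tail := by simp
      rw [htails]
      rw [pv_foldl_cp_cons rest x xs h1, pvCountValid]
      simp only [List.headD_cons]
      by_cases hv : pvValid x = true
      · simp [hv, ih (rest.map List.tail)]
      · simp [hv]
    · -- some line empty or with a different head: both sides are 0
      rw [not_forall] at h1
      obtain ⟨r, hrimp⟩ := h1
      rw [Classical.not_imp] at hrimp
      obtain ⟨hr, hrne⟩ := hrimp
      have hrhs : rest.foldl pvCp (x :: xs) = [] := pv_foldl_cp_mismatch rest x xs ⟨r, hr, hrne⟩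
      rw [hrhs]
      by_cases hemp : r = []
      · -- zip stops immediately
        have : ((x :: xs) :: rest).all (fun s => !s.isEmpty) = false := by
          refine Bool.eq_false_iff.mpr ?_
          intro hc
          have := List.all_eq_true.mp hc r (by simp [hr])
          simp [hemp] at this
        rw [pvZipStar, dif_neg (by simp [this])]
        simp [pvLoopA, pvCountValid]
      · -- nonempty mismatching head: nonuniform column
        cases r with
        | nil => exact absurd rfl hemp
        | cons y t =>
          have hyx : y ≠ x := by
            intro h; exact hrne (by simp [h])
          by_cases hne : ((x :: xs) :: rest).all (fun s => !s.isEmpty) = true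
          · rw [pvZipStar, dif_pos hne, pvLoopA]
            have hxmem : x ∈ ((x :: xs) :: rest).map (fun s => s.headD ' ') := by simp
            have hymem : y ∈ ((x :: xs) :: rest).map (fun s => s.headD ' ') := by
              refine List.mem_map.mpr ⟨y :: t, by simp [hr], by simp⟩
            rw [if_pos (pv_set_two _ x y hxmem hymem (Ne.symm hyx))]
            rfl
          · rw [pvZipStar, dif_neg (by simpa using hne)]
            simp [pvLoopA, pvCountValid]

-- ===== VERDICT (by name: the statement is the Claim_ definition above) =====
theorem strip_email_quotes_spec : Claim_equal_strip_email_quotes := by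
  intro text _
  unfold Spec_strip_email_quotes strip_email_quotes strip_email_quotes_alt
  cases h : (PySem.Str.splitlines text).map String.toList with
  | nil =>
    have hz : pvZipStar [] = [] := by rw [pvZipStar]
    simp only [h, hz]
    rfl
  | cons l rest =>
    simp only [h, pv_main l rest]
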